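-- pv_equiv track=rewrite | github.com/junaedsiam/terraform | two-pointers-sliding-windows/medium/binary-subarray-with-sum.py | binary_subarray_with_sum
-- ===== SOURCE A (Python) =====
-- import collections
--
-- def binary_subarray_with_sum(nums, goal):
--     counter = collections.Counter({0: 1})
--     prefix_sum = res = 0
--
--     for num in nums:
--         prefix_sum += num
--         res += counter[prefix_sum - goal]
--         counter[prefix_sum] += 1
--
--     return res
-- ===== SOURCE B (Python) =====
-- def binary_subarray_with_sum(nums, goal):
--     # Divide and conquer: count subarrays in each half, then cross subarrays
--     # via left-suffix-sum counts matched against right-prefix sums.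
--     n = len(nums)
--     if n <= 1:
--         return 1 if (n == 1 and nums[0] == goal) else 0
--     mid = n // 2
--     left, right = nums[:mid], nums[mid:]
--     total = binary_subarray_with_sum(left, goal) + binary_subarray_with_sum(right, goal)
--     seen = {}
--     s = 0
--     for x in reversed(left):
--         s += x
--         seen[s] = seen.get(s, 0) + 1
--     s = 0
--     for x in right:
--         s += x
--         total += seen.get(goal - s, 0)
--     return total
-- ===== Notes on version B (the rewrite author's own statement) =====
-- stated objective: alternative
-- what changed: Replaces the single-pass prefix-sum Counter with a divide-and-conquer count: recurse on the two halves and count cross subarrays by matching left-suffix sums against right-prefix sums.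
import Mathlib
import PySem

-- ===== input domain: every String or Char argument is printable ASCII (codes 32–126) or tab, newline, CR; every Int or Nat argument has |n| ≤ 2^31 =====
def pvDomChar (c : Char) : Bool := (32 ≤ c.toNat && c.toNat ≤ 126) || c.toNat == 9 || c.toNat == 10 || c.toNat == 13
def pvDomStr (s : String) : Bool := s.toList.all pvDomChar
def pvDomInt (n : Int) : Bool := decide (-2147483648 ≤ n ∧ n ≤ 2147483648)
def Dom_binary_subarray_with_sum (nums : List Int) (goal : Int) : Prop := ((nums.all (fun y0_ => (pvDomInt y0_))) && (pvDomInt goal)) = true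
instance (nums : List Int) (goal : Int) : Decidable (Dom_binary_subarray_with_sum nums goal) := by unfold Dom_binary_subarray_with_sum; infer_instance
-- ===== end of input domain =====

-- B replaces A's single-pass prefix-sum Counter with a divide-and-conquer count
-- (halves + cross subarrays via left-suffix sums matched against right-prefix sums);
-- objective: alternative algorithm, same exact value on every input.

-- ===== PORT A =====
-- the for-loop over nums with state (counter, prefix_sum, res)
def pvAloop (goal : Int) : List Int → PySem.Dict Int Int → Int → Int → Int
  | [], _, _, res => res
  | num :: rest, counter, prefix_sum, res =>
      let p := prefix_sum + num                                    -- prefix_sum += num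
      let res' := res + counter.getD (p - goal) 0                  -- res += counter[prefix_sum - goal]
      pvAloop goal rest (counter.insert p (counter.getD p 0 + 1)) p res'  -- counter[prefix_sum] += 1

def binary_subarray_with_sum (nums : List Int) (goal : Int) : Int :=
  pvAloop goal nums (PySem.Dict.ofList [((0 : Int), (1 : Int))]) 0 0  -- Counter({0: 1})

-- ===== PORT B =====
def binary_subarray_with_sum_alt (nums : List Int) (goal : Int) : Int :=
  if _h : nums.length ≤ 1 then
    -- 1 if (n == 1 and nums[0] == goal) else 0
    if nums.length = 1 ∧ PySem.List.pyGet? nums 0 = some goal then 1 else 0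
  else
    let mid := nums.length / 2
    let left := nums.take mid        -- nums[:mid] (0 ≤ mid ≤ n, so the slice is take)
    let right := nums.drop mid       -- nums[mid:]
    let total := binary_subarray_with_sum_alt left goal + binary_subarray_with_sum_alt right goal
    -- for x in reversed(left): s += x; seen[s] = seen.get(s, 0) + 1
    let seen := (left.reverse.foldl
        (fun (st : Int × PySem.Dict Int Int) x =>
          (st.1 + x, st.2.insert (st.1 + x) (st.2.getD (st.1 + x) 0 + 1)))
        (0, PySem.Dict.empty)).2
    -- for x in right: s += x; total += seen.get(goal - s, 0)
    (right.foldl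
        (fun (st : Int × Int) x => (st.1 + x, st.2 + seen.getD (goal - (st.1 + x)) 0))
        (0, total)).2
termination_by nums.length
decreasing_by
  · simp [List.length_take]; omega
  · simp [List.length_drop]; omega

-- ===== PRECONDITION & SPEC =====
def Spec_binary_subarray_with_sum (nums : List Int) (goal : Int) (out : Int) : Prop := out = binary_subarray_with_sum_alt nums goal
instance (nums : List Int) (goal : Int) (out : Int) : Decidable (Spec_binary_subarray_with_sum nums goal out) := by unfold Spec_binary_subarray_with_sum; infer_instance

-- ===== CLAIM (what is proved, stated in full; the proofs are below) =====
def Claim_equal_binary_subarray_with_sum : Prop := ∀ (nums : List Int) (goal : Int), Dom_binary_subarray_with_sum nums goal → Spec_binary_subarray_with_sum nums goal (binary_subarray_with_sum nums goal)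

-- ===== LEMMAS AND PROOFS =====

-- number of nonempty prefixes of xs whose sum is g
def pvCntStart : List Int → Int → Int
  | [], _ => 0
  | x :: xs, g => (if x = g then 1 else 0) + pvCntStart xs (g - x)

-- number of nonempty subarrays of xs whose sum is g
def pvSpec : List Int → Int → Int
  | [], _ => 0
  | x :: xs, g => pvCntStart (x :: xs) g + pvSpec xs g

-- pairs contributed by points added strictly inside xs (A's loop from an arbitrary counter)
def pvD (goal : Int) : List Int → Int
  | [] => 0
  | _ :: xs => pvCntStart xs goal + pvD goal xs

-- running prefix sums of xs started at s0
def pvPfx (s0 : Int) : List Int → List Int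
  | [] => []
  | x :: xs => (s0 + x) :: pvPfx (s0 + x) xs

-- suffix sums (nonempty suffixes, outermost first)
def pvSfx : List Int → List Int
  | [] => []
  | x :: xs => (x + xs.sum) :: pvSfx xs

theorem pvSum_map_add (l : List Int) (f g : Int → Int) :
    (l.map (fun s => f s + g s)).sum = (l.map f).sum + (l.map g).sum := by
  induction l with
  | nil => simp
  | cons a t ih => simp [ih]; ring

theorem pvSum_map_ite (l : List Int) (c : Int) :
    (l.map (fun s => if s = c then (1 : Int) else 0)).sum = (l.count c : Int) := by
  induction l with
  | nil => simp
  | cons a t ih =>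
      rw [List.map_cons, List.sum_cons, ih, List.count_cons]
      by_cases h : a = c
      · subst h; simp; omega
      · simp [h]

theorem pvCount_insert (d : PySem.Dict Int Int) (seen : List Int) (k : Int)
    (h : ∀ v, d.getD v 0 = (seen.count v : Int)) :
    ∀ v, (d.insert k (d.getD k 0 + 1)).getD v 0 = ((k :: seen).count v : Int) := by
  intro v
  rw [PySem.Dict.getD_insert, List.count_cons]
  by_cases hv : v = k
  · subst hv; rw [if_pos rfl, h]; push_cast; simp
  · rw [if_neg hv, h]; push_cast; simp [Ne.symm hv]

theorem pvAloop_eq (goal : Int) : ∀ (xs : List Int) (d : PySem.Dict Int Int) (seen : List Int) (p res : Int),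
    (∀ v, d.getD v 0 = (seen.count v : Int)) →
    pvAloop goal xs d p res
      = res + ((seen.map (fun s => pvCntStart xs (s + goal - p))).sum + pvD goal xs) := by
  intro xs
  induction xs with
  | nil => intro d seen p res _; simp [pvAloop, pvCntStart, pvD]
  | cons x rest ih =>
      intro d seen p res h
      simp only [pvAloop]
      rw [ih _ _ _ _ (pvCount_insert d seen (p + x) h), h, List.map_cons]
      have e1 : p + x + goal - (p + x) = goal := by ring
      rw [e1]
      have e2 : (seen.map (fun s => pvCntStart (x :: rest) (s + goal - p)))
          = seen.map (fun s => (if s = p + x - goal then (1 : Int) else 0)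
              + pvCntStart rest (s + goal - (p + x))) := by
        apply List.map_congr_left
        intro s _
        simp only [pvCntStart]
        have hc : (x = s + goal - p) = (s = p + x - goal) := by
          apply propext; constructor <;> intro hh <;> omega
        have hd : s + goal - p - x = s + goal - (p + x) := by ring
        simp only [hc, hd]
      rw [e2, pvSum_map_add, pvSum_map_ite]
      simp only [pvD, List.sum_cons]
      ring

theorem pvCntStart_add_pvD (goal : Int) : ∀ (xs : List Int),
    pvCntStart xs goal + pvD goal xs = pvSpec xs goal := by
  intro xs
  induction xs with
  | nil => simp [pvCntStart, pvD, pvSpec]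
  | cons x rest ih => simp only [pvD, pvSpec]; omega

theorem pvA_eq_spec (nums : List Int) (goal : Int) :
    binary_subarray_with_sum nums goal = pvSpec nums goal := by
  unfold binary_subarray_with_sum
  have h0 : ∀ v, (PySem.Dict.ofList [((0 : Int), (1 : Int))]).getD v 0 = (([(0 : Int)].count v : Int)) := by
    intro v
    have he : PySem.Dict.ofList [((0 : Int), (1 : Int))] = PySem.Dict.empty.insert 0 1 := rfl
    rw [he, PySem.Dict.getD_insert]
    by_cases hv : v = 0
    · subst hv; simp
    · rw [if_neg hv]; simp [Ne.symm hv]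
  rw [pvAloop_eq goal nums _ [0] 0 0 h0]
  have e1 : (0 : Int) + goal - 0 = goal := by ring
  simp only [List.map_cons, List.map_nil, List.sum_cons, List.sum_nil, e1]
  rw [← pvCntStart_add_pvD goal nums]
  ring

-- ===== B-side lemmas =====

theorem pvPfx_count : ∀ (xs : List Int) (s0 v : Int),
    ((pvPfx s0 xs).count v : Int) = pvCntStart xs (v - s0) := by
  intro xs
  induction xs with
  | nil => intro s0 v; simp [pvPfx, pvCntStart]
  | cons x rest ih =>
      intro s0 v
      simp only [pvPfx, pvCntStart, List.count_cons]
      have e : v - s0 - x = v - (s0 + x) := by ring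
      rw [e, ← ih (s0 + x) v]
      by_cases hv : v = s0 + x
      · simp [hv]; omega
      · have : (x = v - s0) = False := by
          apply propext; constructor <;> intro hh <;> [omega; exact hh.elim]
        simp [Ne.symm hv, this]

theorem pvPfx_append : ∀ (u : List Int) (s0 : Int) (w : List Int),
    pvPfx s0 (u ++ w) = pvPfx s0 u ++ pvPfx (s0 + u.sum) w := by
  intro u
  induction u with
  | nil => intro s0 w; simp [pvPfx]
  | cons x rest ih =>
      intro s0 w
      simp only [List.cons_append, pvPfx, ih, List.sum_cons]
      have e : s0 + x + rest.sum = s0 + (x + rest.sum) := by ring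
      rw [e]

theorem pvPfx_reverse : ∀ (l : List Int), pvPfx 0 l.reverse = (pvSfx l).reverse := by
  intro l
  induction l with
  | nil => simp [pvPfx, pvSfx]
  | cons x rest ih =>
      simp only [List.reverse_cons, pvSfx, pvPfx_append, ih, pvPfx]
      simp
      ring

theorem pvFoldSeen : ∀ (ys : List Int) (s0 : Int) (d : PySem.Dict Int Int) (v : Int),
    ((ys.foldl (fun (st : Int × PySem.Dict Int Int) x =>
        (st.1 + x, st.2.insert (st.1 + x) (st.2.getD (st.1 + x) 0 + 1))) (s0, d)).2).getD v 0
      = d.getD v 0 + ((pvPfx s0 ys).count v : Int) := by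
  intro ys
  induction ys with
  | nil => intro s0 d v; simp [pvPfx]
  | cons y rest ih =>
      intro s0 d v
      simp only [List.foldl_cons, pvPfx, List.count_cons]
      rw [ih]
      rw [PySem.Dict.getD_insert]
      by_cases hv : v = s0 + y
      · subst hv; simp; omega
      · simp [hv, Ne.symm hv]

theorem pvFoldCross (g : Int) (d : PySem.Dict Int Int) : ∀ (ys : List Int) (s0 t : Int),
    (ys.foldl (fun (st : Int × Int) x => (st.1 + x, st.2 + d.getD (g - (st.1 + x)) 0)) (s0, t)).2
      = t + ((pvPfx s0 ys).map (fun q => d.getD (g - q) 0)).sum := by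
  intro ys
  induction ys with
  | nil => intro s0 t; simp [pvPfx]
  | cons y rest ih =>
      intro s0 t
      simp only [List.foldl_cons, pvPfx, List.map_cons, List.sum_cons]
      rw [ih]
      ring

theorem pvSwap (g : Int) : ∀ (S Q : List Int),
    (Q.map (fun q => (S.count (g - q) : Int))).sum = (S.map (fun s => (Q.count (g - s) : Int))).sum := by
  intro S
  induction S with
  | nil => intro Q; simp
  | cons s S' ih =>
      intro Q
      have e : (Q.map (fun q => (((s :: S').count (g - q) : Nat) : Int)))
          = Q.map (fun q => ((S'.count (g - q) : Nat) : Int) + (if q = g - s then (1 : Int) else 0)) := by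
        apply List.map_congr_left
        intro q _
        rw [List.count_cons]
        by_cases hq : q = g - s
        · subst hq
          have hs : g - (g - s) = s := by ring
          simp [hs]
        · have h2 : ¬s = g - q := by omega
          simp [hq, h2]
      rw [e, pvSum_map_add, pvSum_map_ite, ih, List.map_cons, List.sum_cons]
      ring

theorem pvCntStart_append : ∀ (l : List Int) (r : List Int) (g : Int),
    pvCntStart (l ++ r) g = pvCntStart l g + pvCntStart r (g - l.sum) := by
  intro l
  induction l with
  | nil => intro r g; simp [pvCntStart]
  | cons x rest ih =>
      intro r g
      simp only [List.cons_append, pvCntStart, ih, List.sum_cons]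
      have e : g - x - rest.sum = g - (x + rest.sum) := by ring
      rw [e]; ring

theorem pvSpec_append : ∀ (l r : List Int) (g : Int),
    pvSpec (l ++ r) g
      = pvSpec l g + pvSpec r g + ((pvSfx l).map (fun s => pvCntStart r (g - s))).sum := by
  intro l
  induction l with
  | nil => intro r g; simp [pvSpec, pvSfx]
  | cons x rest ih =>
      intro r g
      simp only [List.cons_append, pvSpec, pvSfx, List.map_cons, List.sum_cons, pvCntStart,
        pvCntStart_append, ih]
      have e : g - x - rest.sum = g - (x + rest.sum) := by ring
      rw [e]
      ring

theorem pvAlt_eq_spec_aux (goal : Int) : ∀ (n : Nat) (nums : List Int), nums.length = n →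
    binary_subarray_with_sum_alt nums goal = pvSpec nums goal := by
  intro n
  induction n using Nat.strong_induction_on with
  | _ n ih =>
      intro nums hlen
      rw [binary_subarray_with_sum_alt]
      by_cases h1 : nums.length ≤ 1
      · rw [dif_pos h1]
        match nums, h1 with
        | [], _ => simp [pvSpec]
        | [x], _ =>
            simp [PySem.List.pyGet?, PySem.List.pyIdx?, pvSpec, pvCntStart]
      · rw [dif_neg h1]
        show ((nums.drop (nums.length / 2)).foldl
            (fun (st : Int × Int) x => (st.1 + x, st.2 + ((((nums.take (nums.length / 2)).reverse).foldl
                (fun (st : Int × PySem.Dict Int Int) x =>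
                  (st.1 + x, st.2.insert (st.1 + x) (st.2.getD (st.1 + x) 0 + 1)))
                (0, PySem.Dict.empty)).2).getD (goal - (st.1 + x)) 0))
            (0, binary_subarray_with_sum_alt (nums.take (nums.length / 2)) goal
                + binary_subarray_with_sum_alt (nums.drop (nums.length / 2)) goal)).2
          = pvSpec nums goal
        have hmid1 : 1 ≤ nums.length / 2 := by omega
        have hmid2 : nums.length / 2 < nums.length := by omega
        have hL : (nums.take (nums.length / 2)).length < n := by
          simp [List.length_take]; omega
        have hR : (nums.drop (nums.length / 2)).length < n := by
          simp [List.length_drop]; omega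
        rw [ih _ hL _ rfl, ih _ hR _ rfl]
        rw [pvFoldCross]
        have hseen : ∀ v, ((((nums.take (nums.length / 2)).reverse).foldl
            (fun (st : Int × PySem.Dict Int Int) x =>
              (st.1 + x, st.2.insert (st.1 + x) (st.2.getD (st.1 + x) 0 + 1)))
            (0, PySem.Dict.empty)).2).getD v 0
            = ((pvSfx (nums.take (nums.length / 2))).count v : Int) := by
          intro v
          rw [pvFoldSeen, pvPfx_reverse, List.count_reverse]
          simp
        have ecross : (((pvPfx 0 (nums.drop (nums.length / 2))).map
              (fun q => ((((nums.take (nums.length / 2)).reverse).foldl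
                (fun (st : Int × PySem.Dict Int Int) x =>
                  (st.1 + x, st.2.insert (st.1 + x) (st.2.getD (st.1 + x) 0 + 1)))
                (0, PySem.Dict.empty)).2).getD (goal - q) 0)).sum)
            = ((pvSfx (nums.take (nums.length / 2))).map
                (fun s => pvCntStart (nums.drop (nums.length / 2)) (goal - s))).sum := by
          rw [List.map_congr_left (fun q _ => hseen (goal - q))]
          rw [pvSwap]
          congr 1
          apply List.map_congr_left
          intro s _
          rw [pvPfx_count]
          congr 1
          ring
        rw [ecross]
        conv_rhs => rw [← List.take_append_drop (nums.length / 2) nums]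
        rw [pvSpec_append]

theorem pvAlt_eq_spec (nums : List Int) (goal : Int) :
    binary_subarray_with_sum_alt nums goal = pvSpec nums goal :=
  pvAlt_eq_spec_aux goal nums.length nums rfl

-- ===== VERDICT (by name: the statement is the Claim_ definition above) =====
theorem binary_subarray_with_sum_spec : Claim_equal_binary_subarray_with_sum := by
  intro nums goal _
  unfold Spec_binary_subarray_with_sum
  rw [pvA_eq_spec, pvAlt_eq_spec]
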